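-- pv_equiv track=rewrite | github.com/shibam120302/LeetCode | Unique rows in boolean matrix - GFG/unique-rows-in-boolean-matrix.py | uniqueRow
-- ===== SOURCE A (Python) =====
-- from typing import List
--
-- def uniqueRow(row : int, col : int, M : List[List[int]]) -> List[List[int]]:
--     st = set()
--     vec = []
--
--     for i in range(row):
--         curr = ''
--         for j in range(col):
--             curr += str(M[i][j])
--         st.add(curr)
--
--     for i in range(row):
--         curr = ''
--         for j in range(col):
--             curr += str(M[i][j])
--         if curr in st:
--             st.remove(curr)
--             demo = []
--             for j in range(col):
--                 demo.append(M[i][j])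
--             vec.append(demo)
--
--     return vec
-- ===== SOURCE B (Python) =====
-- from typing import List
--
-- def uniqueRow(row : int, col : int, M : List[List[int]]) -> List[List[int]]:
--     seen = set()
--     vec = []
--     for i in range(row):
--         pre = [M[i][j] for j in range(col)]
--         key = ''.join(str(x) for x in pre)
--         if key not in seen:
--             seen.add(key)
--             vec.append(pre)
--     return vec
-- ===== Notes on version B (the rewrite author's own statement) =====
-- stated objective: simpler
-- what changed: One pass over the rows growing a 'seen' key set (add on first occurrence, comprehension-built row copy, join-built key) replaces A's two full passes: first build the complete key set, then filter rows by key membership-and-removal with element-by-element string and copy loops.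
import Mathlib
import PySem

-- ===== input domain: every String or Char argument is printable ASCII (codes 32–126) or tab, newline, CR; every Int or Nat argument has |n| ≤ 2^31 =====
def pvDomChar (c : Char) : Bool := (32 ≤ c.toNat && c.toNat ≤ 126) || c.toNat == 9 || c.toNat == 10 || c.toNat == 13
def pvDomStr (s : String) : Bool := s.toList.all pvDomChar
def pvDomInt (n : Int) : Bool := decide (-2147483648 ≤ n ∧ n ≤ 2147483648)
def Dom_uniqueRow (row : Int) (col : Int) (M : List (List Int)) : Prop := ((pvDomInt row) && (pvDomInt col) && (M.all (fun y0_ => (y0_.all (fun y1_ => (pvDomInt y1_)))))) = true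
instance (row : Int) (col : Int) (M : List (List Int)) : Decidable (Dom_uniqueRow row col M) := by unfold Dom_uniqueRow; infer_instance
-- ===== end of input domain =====

-- B replaces A's two full passes (build the complete key set, then filter rows by key
-- membership-and-removal) with one pass growing a 'seen' key set (objective: simpler).

-- ===== PORT A =====
-- the duplicated inner loop "curr = ''; for j in range(col): curr += str(M[i][j])": A runs it verbatim in both passes
def rowKeyA (col : Int) (r : List Int) : String :=
  (PySem.List.pyRange 0 col 1).foldl (fun curr j => curr ++ PySem.Int.toStr (PySem.List.pyGetD r j 0)) ""

def uniqueRow (row : Int) (col : Int) (M : List (List Int)) : List (List Int) :=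
  -- pass 1: st = set of all row keys
  let st : PySem.Set String :=
    (PySem.List.pyRange 0 row 1).foldl
      (fun st i => PySem.Set.add st (rowKeyA col (PySem.List.pyGetD M i []))) PySem.Set.empty
  -- pass 2: re-build each key; if still in st, remove it and append the element-by-element copy
  ((PySem.List.pyRange 0 row 1).foldl
      (fun (p : PySem.Set String × List (List Int)) i =>
        if PySem.Set.contains p.1 (rowKeyA col (PySem.List.pyGetD M i [])) then
          ((PySem.Set.remove? p.1 (rowKeyA col (PySem.List.pyGetD M i []))).getD p.1,
           p.2 ++ [(PySem.List.pyRange 0 col 1).foldl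
                     (fun demo j => demo ++ [PySem.List.pyGetD (PySem.List.pyGetD M i []) j 0]) []])
        else p)
      (st, [])).2

-- ===== PORT B =====
def uniqueRow_alt (row : Int) (col : Int) (M : List (List Int)) : List (List Int) :=
  ((PySem.List.pyRange 0 row 1).foldl
      (fun (p : PySem.Set String × List (List Int)) i =>
        if PySem.Set.contains p.1
            (PySem.Str.join ""
              (((PySem.List.pyRange 0 col 1).map
                  (fun j => PySem.List.pyGetD (PySem.List.pyGetD M i []) j 0)).map PySem.Int.toStr))
        then p
        else (PySem.Set.add p.1
                (PySem.Str.join ""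
                  (((PySem.List.pyRange 0 col 1).map
                      (fun j => PySem.List.pyGetD (PySem.List.pyGetD M i []) j 0)).map PySem.Int.toStr)),
              p.2 ++ [(PySem.List.pyRange 0 col 1).map
                        (fun j => PySem.List.pyGetD (PySem.List.pyGetD M i []) j 0)]))
      (PySem.Set.empty, [])).2

-- ===== PRECONDITION & SPEC =====
-- Pre_ is exactly where A returns normally: when col ≤ 0 no element is ever indexed and A
-- always returns; otherwise A raises IndexError iff row > len(M) or col > len(M[i]) for a visited i.
def Pre_uniqueRow (row : Int) (col : Int) (M : List (List Int)) : Prop :=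
  col ≤ 0 ∨ (row ≤ (M.length : Int) ∧ ∀ r ∈ M.take row.toNat, col ≤ (r.length : Int))
instance (row : Int) (col : Int) (M : List (List Int)) : Decidable (Pre_uniqueRow row col M) := by
  unfold Pre_uniqueRow; infer_instance

def pvWitness_uniqueRow : Int × Int × List (List Int) := (3, 2, [[1, 0], [0, 1], [1, 0]])

def Spec_uniqueRow (row : Int) (col : Int) (M : List (List Int)) (out : List (List Int)) : Prop := out = uniqueRow_alt row col M
instance (row : Int) (col : Int) (M : List (List Int)) (out : List (List Int)) : Decidable (Spec_uniqueRow row col M out) := by unfold Spec_uniqueRow; infer_instance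

-- ===== CLAIM (what is proved, stated in full; the proofs are below) =====
def Claim_equal_uniqueRow : Prop := ∀ (row : Int) (col : Int) (M : List (List Int)), Dom_uniqueRow row col M → Pre_uniqueRow row col M → Spec_uniqueRow row col M (uniqueRow row col M)

-- ===== LEMMAS AND PROOFS =====

theorem pyRange_zero_toNat (n : Int) :
    PySem.List.pyRange 0 n 1 = PySem.List.pyRange 0 ((n.toNat : Int)) 1 := by
  rcases le_or_gt n 0 with h | h
  · rw [PySem.List.pyRange_one_eq_nil h, PySem.List.pyRange_one_eq_nil (by omega)]
  · rw [Int.toNat_of_nonneg (le_of_lt h)]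

theorem join_nil_str : PySem.Str.join "" ([] : List String) = "" := by
  apply String.toList_inj.mp
  simp [PySem.Str.toList_join, PySem.Chars.join_nil]

theorem join_cons_str (p : String) (rest : List String) :
    PySem.Str.join "" (p :: rest) = p ++ PySem.Str.join "" rest := by
  apply String.toList_inj.mp
  rw [String.toList_append, PySem.Str.toList_join, PySem.Str.toList_join]
  cases rest with
  | nil => simp [PySem.Chars.join_singleton, PySem.Chars.join_nil]
  | cons q t => rw [List.map_cons, List.map_cons, PySem.Chars.join_cons_cons]; simp

theorem keyfold (l : List Int) (s : String) :
    l.foldl (fun c x => c ++ PySem.Int.toStr x) s = s ++ PySem.Str.join "" (l.map PySem.Int.toStr) := by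
  induction l generalizing s with
  | nil => simp [join_nil_str]
  | cons a t ih => simp only [List.foldl_cons, List.map_cons, ih, join_cons_str, String.append_assoc]

-- A's inner string loop computes the join-of-strs key of the first col entries
theorem rowKeyA_eq (col : Int) (r : List Int) (hle : col.toNat ≤ r.length) :
    rowKeyA col r = PySem.Str.join "" ((r.take col.toNat).map PySem.Int.toStr) := by
  unfold rowKeyA
  have hlen : (r.take col.toNat).length = col.toNat := by simp; omega
  refine Eq.trans (PySem.List.foldl_congr_mem' _ _
      (fun curr j => curr ++ PySem.Int.toStr (PySem.List.pyGetD (r.take col.toNat) j 0)) _ ?_) ?_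
  · intro j hj acc
    obtain ⟨h1, h2⟩ := PySem.List.mem_pyRange_one.1 hj
    beta_reduce
    rw [PySem.List.pyGetD_eq_getElem r 0 h1 (by omega),
        PySem.List.pyGetD_eq_getElem (r.take col.toNat) 0 h1 (by omega),
        List.getElem_take]
  · rw [pyRange_zero_toNat col,
        show ((col.toNat : Int)) = (((r.take col.toNat).length : Int)) by rw [hlen],
        PySem.List.foldl_pyRange_zero_pyGetD' (r.take col.toNat) 0
          (fun curr x => curr ++ PySem.Int.toStr x) "",
        keyfold, String.empty_append]

-- A's inner copy loop produces the first col entries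
theorem demoFold_eq (col : Int) (r : List Int) (hle : col.toNat ≤ r.length) :
    (PySem.List.pyRange 0 col 1).foldl (fun demo j => demo ++ [PySem.List.pyGetD r j 0]) []
      = r.take col.toNat := by
  have hlen : (r.take col.toNat).length = col.toNat := by simp; omega
  refine Eq.trans (PySem.List.foldl_congr_mem' _ _
      (fun demo j => demo ++ [PySem.List.pyGetD (r.take col.toNat) j 0]) _ ?_) ?_
  · intro j hj acc
    obtain ⟨h1, h2⟩ := PySem.List.mem_pyRange_one.1 hj
    beta_reduce
    rw [PySem.List.pyGetD_eq_getElem r 0 h1 (by omega),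
        PySem.List.pyGetD_eq_getElem (r.take col.toNat) 0 h1 (by omega),
        List.getElem_take]
  · rw [pyRange_zero_toNat col,
        show ((col.toNat : Int)) = (((r.take col.toNat).length : Int)) by rw [hlen],
        PySem.List.foldl_pyRange_zero_pyGetD' (r.take col.toNat) 0 (fun demo x => demo ++ [x]) [],
        PySem.List.foldl_append_singleton_eq_self, List.nil_append]

-- B's comprehension produces the first col entries
theorem mapTake_eq (col : Int) (r : List Int) (hle : col.toNat ≤ r.length) :
    (PySem.List.pyRange 0 col 1).map (fun j => PySem.List.pyGetD r j 0) = r.take col.toNat := by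
  have hlen : (r.take col.toNat).length = col.toNat := by simp; omega
  refine Eq.trans (List.map_congr_left
      (g := fun j => PySem.List.pyGetD (r.take col.toNat) j 0) ?_) ?_
  · intro j hj
    obtain ⟨h1, h2⟩ := PySem.List.mem_pyRange_one.1 hj
    beta_reduce
    rw [PySem.List.pyGetD_eq_getElem r 0 h1 (by omega),
        PySem.List.pyGetD_eq_getElem (r.take col.toNat) 0 h1 (by omega),
        List.getElem_take]
  · rw [pyRange_zero_toNat col,
        show ((col.toNat : Int)) = (((r.take col.toNat).length : Int)) by rw [hlen]]
    exact PySem.List.map_pyGetD_pyRange_zero' (r.take col.toNat) 0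

-- the heart: A's filter-by-removal pass over a superset st and B's grow-a-seen-set pass agree,
-- as long as each key of the remaining rows is in st exactly when it has not been seen yet
theorem uniq_loop_eq (K : List Int → String) (G : List Int → List Int) (L : List (List Int))
    (st seen : PySem.Set String) (vec : List (List Int))
    (hinv : ∀ r ∈ L, (K r ∈ st ↔ K r ∉ seen)) :
    (L.foldl (fun (p : PySem.Set String × List (List Int)) r =>
        if PySem.Set.contains p.1 (K r) then
          ((PySem.Set.remove? p.1 (K r)).getD p.1, p.2 ++ [G r])
        else p) (st, vec)).2
      =
    (L.foldl (fun (p : PySem.Set String × List (List Int)) r =>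
        if PySem.Set.contains p.1 (K r) then p
        else (PySem.Set.add p.1 (K r), p.2 ++ [G r])) (seen, vec)).2 := by
  induction L generalizing st seen vec with
  | nil => rfl
  | cons r L ih =>
    have hr := hinv r (by simp)
    by_cases hk : K r ∈ st
    · have hns : K r ∉ seen := hr.mp hk
      have hc1 : PySem.Set.contains st (K r) = true := (PySem.Set.contains_iff st _).2 hk
      have hc2 : ¬ PySem.Set.contains seen (K r) = true := by
        rw [PySem.Set.contains_iff]; exact hns
      have hadd : PySem.Set.add seen (K r) = seen ++ [K r] := PySem.Set.add_of_not_mem hns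
      simp only [List.foldl_cons, hc1, if_true, if_neg hc2,
        PySem.Set.remove?, Option.getD_some, hadd]
      apply ih
      intro r' hr'
      have h' := hinv r' (by simp [hr'])
      simp only [PySem.Set.mem_discard, List.mem_append, List.mem_singleton, not_or, h']
    · have hse : K r ∈ seen := by by_contra h; exact hk (hr.mpr h)
      have hc1 : ¬ PySem.Set.contains st (K r) = true := by
        rw [PySem.Set.contains_iff]; exact hk
      have hc2 : PySem.Set.contains seen (K r) = true := (PySem.Set.contains_iff seen _).2 hse
      simp only [List.foldl_cons, if_neg hc1, if_pos hc2]
      exact ih st seen vec (fun r' hr' => hinv r' (by simp [hr']))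

-- the col ≤ 0 case: every key is "" and every copied row is []
theorem pass1_const (l : List Int) :
    l.foldl (fun (st : PySem.Set String) (_ : Int) => PySem.Set.add st "") [""] = [""] := by
  induction l with
  | nil => rfl
  | cons a t ih =>
    simp only [List.foldl_cons]
    rw [PySem.Set.add_of_mem (by simp)]
    exact ih

theorem loopA_skip (l : List Int) (vec : List (List Int)) :
    l.foldl (fun (p : PySem.Set String × List (List Int)) (_ : Int) =>
        if PySem.Set.contains p.1 "" then ((PySem.Set.remove? p.1 "").getD p.1, p.2 ++ [[]]) else p)
      (([] : PySem.Set String), vec) = ([], vec) := by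
  induction l with
  | nil => rfl
  | cons a t ih =>
    simp only [List.foldl_cons]
    rw [if_neg (by decide)]
    exact ih

theorem loopB_skip (l : List Int) (vec : List (List Int)) :
    l.foldl (fun (p : PySem.Set String × List (List Int)) (_ : Int) =>
        if PySem.Set.contains p.1 "" then p else (PySem.Set.add p.1 "", p.2 ++ [[]]))
      (([""] : PySem.Set String), vec) = ([""], vec) := by
  induction l with
  | nil => rfl
  | cons a t ih =>
    simp only [List.foldl_cons]
    rw [if_pos (by decide)]
    exact ih

theorem uniqueRow_spec : Claim_equal_uniqueRow := by
  intro row col M _hdom hpre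
  unfold Spec_uniqueRow
  simp only [uniqueRow, uniqueRow_alt]
  rcases hpre with hc0 | ⟨hrM, hcols⟩
  · -- col ≤ 0: the inner range is empty, keys are "" and copies are []
    rw [PySem.List.pyRange_one_eq_nil hc0]
    simp only [rowKeyA, PySem.List.pyRange_one_eq_nil hc0, List.foldl_nil, List.map_nil,
      join_nil_str]
    cases h : PySem.List.pyRange 0 row 1 with
    | nil => rfl
    | cons a t =>
      simp only [List.foldl_cons]
      rw [show PySem.Set.add PySem.Set.empty "" = [""] by decide,
          pass1_const,
          if_pos (by decide : PySem.Set.contains ([""] : PySem.Set String) "" = true),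
          if_neg (by decide : ¬ PySem.Set.contains (PySem.Set.empty : PySem.Set String) "" = true),
          show ((PySem.Set.remove? ([""] : PySem.Set String) "").getD [""]) = ([] : PySem.Set String) by decide,
          loopA_skip, loopB_skip]
  have hMtlen : (M.take row.toNat).length = row.toNat := by simp; omega
  -- reduce each outer loop "for i in range(row): … M[i] …" to a fold over M.take row.toNat
  have hOuter : ∀ {β : Type} (f : β → List Int → β) (init : β),
      (PySem.List.pyRange 0 row 1).foldl (fun acc i => f acc (PySem.List.pyGetD M i [])) init
        = (M.take row.toNat).foldl f init := by
    intro β f init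
    refine Eq.trans (PySem.List.foldl_congr_mem' _ _
        (fun acc i => f acc (PySem.List.pyGetD (M.take row.toNat) i [])) _ ?_) ?_
    · intro i hi acc
      obtain ⟨h1, h2⟩ := PySem.List.mem_pyRange_one.1 hi
      beta_reduce
      rw [PySem.List.pyGetD_eq_getElem M [] h1 (by omega),
          PySem.List.pyGetD_eq_getElem (M.take row.toNat) [] h1 (by omega),
          List.getElem_take]
    · rw [pyRange_zero_toNat row,
          show ((row.toNat : Int)) = (((M.take row.toNat).length : Int)) by rw [hMtlen]]
      exact PySem.List.foldl_pyRange_zero_pyGetD' _ [] f init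
  have hclen : ∀ r ∈ M.take row.toNat, col.toNat ≤ r.length := by
    intro r hr
    have := hcols r hr
    omega
  have e1 : (PySem.List.pyRange 0 row 1).foldl
      (fun st i => PySem.Set.add st (rowKeyA col (PySem.List.pyGetD M i []))) PySem.Set.empty
      = (M.take row.toNat).foldl (fun st r => PySem.Set.add st (rowKeyA col r)) PySem.Set.empty :=
    hOuter (fun st r => PySem.Set.add st (rowKeyA col r)) PySem.Set.empty
  have e2 : (PySem.List.pyRange 0 row 1).foldl
      (fun (p : PySem.Set String × List (List Int)) i =>
        if PySem.Set.contains p.1 (rowKeyA col (PySem.List.pyGetD M i [])) then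
          ((PySem.Set.remove? p.1 (rowKeyA col (PySem.List.pyGetD M i []))).getD p.1,
           p.2 ++ [(PySem.List.pyRange 0 col 1).foldl
                     (fun demo j => demo ++ [PySem.List.pyGetD (PySem.List.pyGetD M i []) j 0]) []])
        else p)
      ((M.take row.toNat).foldl (fun st r => PySem.Set.add st (rowKeyA col r)) PySem.Set.empty, [])
      = (M.take row.toNat).foldl
      (fun (p : PySem.Set String × List (List Int)) r =>
        if PySem.Set.contains p.1 (rowKeyA col r) then
          ((PySem.Set.remove? p.1 (rowKeyA col r)).getD p.1,
           p.2 ++ [(PySem.List.pyRange 0 col 1).foldl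
                     (fun demo j => demo ++ [PySem.List.pyGetD r j 0]) []])
        else p)
      ((M.take row.toNat).foldl (fun st r => PySem.Set.add st (rowKeyA col r)) PySem.Set.empty, []) :=
    hOuter (fun (p : PySem.Set String × List (List Int)) r =>
        if PySem.Set.contains p.1 (rowKeyA col r) then
          ((PySem.Set.remove? p.1 (rowKeyA col r)).getD p.1,
           p.2 ++ [(PySem.List.pyRange 0 col 1).foldl
                     (fun demo j => demo ++ [PySem.List.pyGetD r j 0]) []])
        else p) _
  have e2b : (PySem.List.pyRange 0 row 1).foldl
      (fun (p : PySem.Set String × List (List Int)) i =>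
        if PySem.Set.contains p.1
            (PySem.Str.join ""
              (((PySem.List.pyRange 0 col 1).map
                  (fun j => PySem.List.pyGetD (PySem.List.pyGetD M i []) j 0)).map PySem.Int.toStr))
        then p
        else (PySem.Set.add p.1
                (PySem.Str.join ""
                  (((PySem.List.pyRange 0 col 1).map
                      (fun j => PySem.List.pyGetD (PySem.List.pyGetD M i []) j 0)).map PySem.Int.toStr)),
              p.2 ++ [(PySem.List.pyRange 0 col 1).map
                        (fun j => PySem.List.pyGetD (PySem.List.pyGetD M i []) j 0)]))
      (PySem.Set.empty, [])
      = (M.take row.toNat).foldl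
      (fun (p : PySem.Set String × List (List Int)) r =>
        if PySem.Set.contains p.1
            (PySem.Str.join ""
              (((PySem.List.pyRange 0 col 1).map (fun j => PySem.List.pyGetD r j 0)).map PySem.Int.toStr))
        then p
        else (PySem.Set.add p.1
                (PySem.Str.join ""
                  (((PySem.List.pyRange 0 col 1).map (fun j => PySem.List.pyGetD r j 0)).map PySem.Int.toStr)),
              p.2 ++ [(PySem.List.pyRange 0 col 1).map (fun j => PySem.List.pyGetD r j 0)]))
      (PySem.Set.empty, []) :=
    hOuter (fun (p : PySem.Set String × List (List Int)) r =>
        if PySem.Set.contains p.1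
            (PySem.Str.join ""
              (((PySem.List.pyRange 0 col 1).map (fun j => PySem.List.pyGetD r j 0)).map PySem.Int.toStr))
        then p
        else (PySem.Set.add p.1
                (PySem.Str.join ""
                  (((PySem.List.pyRange 0 col 1).map (fun j => PySem.List.pyGetD r j 0)).map PySem.Int.toStr)),
              p.2 ++ [(PySem.List.pyRange 0 col 1).map (fun j => PySem.List.pyGetD r j 0)])) _
  rw [e1, e2, e2b]
  -- rewrite key and copy inside the bodies, over the rows actually visited
  have hkey : ∀ r ∈ M.take row.toNat,
      rowKeyA col r = PySem.Str.join "" ((r.take col.toNat).map PySem.Int.toStr) :=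
    fun r hr => rowKeyA_eq col r (hclen r hr)
  have hdemo : ∀ r ∈ M.take row.toNat,
      (PySem.List.pyRange 0 col 1).foldl (fun demo j => demo ++ [PySem.List.pyGetD r j 0]) []
        = r.take col.toNat :=
    fun r hr => demoFold_eq col r (hclen r hr)
  have hmap : ∀ r ∈ M.take row.toNat,
      (PySem.List.pyRange 0 col 1).map (fun j => PySem.List.pyGetD r j 0) = r.take col.toNat :=
    fun r hr => mapTake_eq col r (hclen r hr)
  have e3 : (M.take row.toNat).foldl (fun st r => PySem.Set.add st (rowKeyA col r)) PySem.Set.empty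
      = (M.take row.toNat).foldl
          (fun st r => PySem.Set.add st (PySem.Str.join "" ((r.take col.toNat).map PySem.Int.toStr)))
          PySem.Set.empty :=
    PySem.List.foldl_congr_mem' _ _ _ _ (fun r hr st => by rw [hkey r hr])
  have e4 := PySem.List.foldl_congr_mem' (M.take row.toNat)
      (fun (p : PySem.Set String × List (List Int)) r =>
        if PySem.Set.contains p.1 (rowKeyA col r) then
          ((PySem.Set.remove? p.1 (rowKeyA col r)).getD p.1,
           p.2 ++ [(PySem.List.pyRange 0 col 1).foldl
                     (fun demo j => demo ++ [PySem.List.pyGetD r j 0]) []])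
        else p)
      (fun (p : PySem.Set String × List (List Int)) r =>
        if PySem.Set.contains p.1 (PySem.Str.join "" ((r.take col.toNat).map PySem.Int.toStr)) then
          ((PySem.Set.remove? p.1 (PySem.Str.join "" ((r.take col.toNat).map PySem.Int.toStr))).getD p.1,
           p.2 ++ [r.take col.toNat])
        else p)
      ((M.take row.toNat).foldl
          (fun st r => PySem.Set.add st (PySem.Str.join "" ((r.take col.toNat).map PySem.Int.toStr)))
          PySem.Set.empty, [])
      (fun r hr p => by beta_reduce; rw [hkey r hr, hdemo r hr])
  rw [e3, e4]
  have e5 := PySem.List.foldl_congr_mem' (M.take row.toNat)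
      (fun (p : PySem.Set String × List (List Int)) r =>
        if PySem.Set.contains p.1
            (PySem.Str.join ""
              (((PySem.List.pyRange 0 col 1).map (fun j => PySem.List.pyGetD r j 0)).map PySem.Int.toStr))
        then p
        else (PySem.Set.add p.1
                (PySem.Str.join ""
                  (((PySem.List.pyRange 0 col 1).map (fun j => PySem.List.pyGetD r j 0)).map PySem.Int.toStr)),
              p.2 ++ [(PySem.List.pyRange 0 col 1).map (fun j => PySem.List.pyGetD r j 0)]))
      (fun (p : PySem.Set String × List (List Int)) r =>
        if PySem.Set.contains p.1 (PySem.Str.join "" ((r.take col.toNat).map PySem.Int.toStr)) then p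
        else (PySem.Set.add p.1 (PySem.Str.join "" ((r.take col.toNat).map PySem.Int.toStr)),
              p.2 ++ [r.take col.toNat]))
      (PySem.Set.empty, [])
      (fun r hr p => by beta_reduce; rw [hmap r hr])
  rw [e5]
  -- the two one-state loops agree: st0 contains exactly the keys of the visited rows
  have hst0 : (M.take row.toNat).foldl
      (fun st r => PySem.Set.add st (PySem.Str.join "" ((r.take col.toNat).map PySem.Int.toStr)))
      PySem.Set.empty
      = PySem.Set.ofList ((M.take row.toNat).map
          (fun r => PySem.Str.join "" ((r.take col.toNat).map PySem.Int.toStr))) := by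
    rw [PySem.Set.ofList_eq_foldl, List.foldl_map]
    rfl
  rw [hst0]
  exact uniq_loop_eq (fun r => PySem.Str.join "" ((r.take col.toNat).map PySem.Int.toStr))
    (fun r => r.take col.toNat) (M.take row.toNat) _ [] []
    (fun r hr => by
      simp only [PySem.Set.mem_ofList, List.not_mem_nil, not_false_iff, iff_true, List.mem_map]
      exact ⟨r, hr, rfl⟩)
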